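-- pv_equiv track=rewrite | github.com/brent132/SOLO_CONQUEST | game_core/editor/tileset_tab/tileset_brush.py | iter_brush_positions
-- ===== SOURCE A (Python) =====
-- from typing import Iterator
--
-- def iter_brush_positions(
--     center_x: int, center_y: int, size: int, shape: str = "square"
-- ) -> Iterator[tuple[int, int]]:
--     """Yield grid coordinates affected by a brush of the given size and shape."""
--     radius = size // 2
--     if shape == "circle":
--         for dy in range(-radius, radius + 1):
--             for dx in range(-radius, radius + 1):
--                 if dx * dx + dy * dy <= radius * radius:
--                     yield center_x + dx, center_y + dy
--     else:  # square
--         for dy in range(-radius, radius + 1):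
--             for dx in range(-radius, radius + 1):
--                 yield center_x + dx, center_y + dy
-- ===== SOURCE B (Python) =====
-- def iter_brush_positions(center_x, center_y, size, shape="square"):
--     """Yield grid coordinates affected by a brush of the given size and shape."""
--     radius = size // 2
--     if shape == "circle":
--         r2 = radius * radius
--         def half(dy):
--             # largest m with m*m <= r2 - dy*dy (scanline half-width)
--             m = 0
--             while (m + 1) * (m + 1) <= r2 - dy * dy:
--                 m += 1
--             return m
--     else:
--         def half(dy):
--             return radius
--     return ((center_x + dx, center_y + dy)
--             for dy in range(-radius, radius + 1)
--             for dx in range(-half(dy), half(dy) + 1))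
-- ===== Notes on version B (the rewrite author's own statement) =====
-- stated objective: alternative
-- what changed: B replaces A's generator with nested per-point loops (and a per-point distance test for circles) by a single flat comprehension over rows with a per-row half-width function: constant radius for squares, an integer-sqrt scanline half-width for circles, so no per-point distance test remains.
import Mathlib
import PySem

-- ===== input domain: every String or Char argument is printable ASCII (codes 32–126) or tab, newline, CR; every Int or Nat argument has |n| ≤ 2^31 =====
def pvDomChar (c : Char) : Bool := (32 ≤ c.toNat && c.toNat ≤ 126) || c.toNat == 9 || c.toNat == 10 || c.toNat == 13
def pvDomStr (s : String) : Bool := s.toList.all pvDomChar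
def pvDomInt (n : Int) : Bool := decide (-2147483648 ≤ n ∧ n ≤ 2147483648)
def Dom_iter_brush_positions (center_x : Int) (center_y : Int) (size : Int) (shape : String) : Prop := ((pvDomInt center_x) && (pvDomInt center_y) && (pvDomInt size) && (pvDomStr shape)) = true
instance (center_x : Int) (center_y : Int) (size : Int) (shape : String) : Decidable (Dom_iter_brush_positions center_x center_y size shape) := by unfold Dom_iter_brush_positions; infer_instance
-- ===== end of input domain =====

-- B replaces A's nested per-point loops (with a per-point distance test for circles) by one
-- flat per-row comprehension over a per-row half-width function; objective: alternative algorithm.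

-- ===== PORT A =====
def iter_brush_positions (center_x : Int) (center_y : Int) (size : Int) (shape : String) : List (Int × Int) :=
  let radius := PySem.Int.floordiv size 2
  if shape == "circle" then
    (PySem.List.pyRange (-radius) (radius + 1) 1).foldl (fun acc dy =>
      (PySem.List.pyRange (-radius) (radius + 1) 1).foldl (fun acc dx =>
        if dx * dx + dy * dy ≤ radius * radius then acc ++ [(center_x + dx, center_y + dy)] else acc) acc) []
  else
    (PySem.List.pyRange (-radius) (radius + 1) 1).foldl (fun acc dy =>
      (PySem.List.pyRange (-radius) (radius + 1) 1).foldl (fun acc dx =>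
        acc ++ [(center_x + dx, center_y + dy)]) acc) []

-- ===== PORT B =====
-- hand-written integer-sqrt loop of Source B: 'm = 0; while (m+1)*(m+1) <= rem: m += 1'
def halfWidthLoop (rem : Int) (m : Int) : Int :=
  if (m + 1) * (m + 1) ≤ rem then halfWidthLoop rem (m + 1) else m
termination_by (rem - m).toNat
decreasing_by
  have : m < rem := by nlinarith [sq_nonneg (m + 1), sq_nonneg m]
  omega

def iter_brush_positions_alt (center_x : Int) (center_y : Int) (size : Int) (shape : String) : List (Int × Int) :=
  let radius := PySem.Int.floordiv size 2
  let half : Int → Int :=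
    if shape == "circle" then fun dy => halfWidthLoop (radius * radius - dy * dy) 0
    else fun _ => radius
  (PySem.List.pyRange (-radius) (radius + 1) 1).flatMap fun dy =>
    (PySem.List.pyRange (-(half dy)) (half dy + 1) 1).map fun dx => (center_x + dx, center_y + dy)

-- ===== PRECONDITION & SPEC =====
def Spec_iter_brush_positions (center_x : Int) (center_y : Int) (size : Int) (shape : String) (out : List (Int × Int)) : Prop := out = iter_brush_positions_alt center_x center_y size shape
instance (center_x : Int) (center_y : Int) (size : Int) (shape : String) (out : List (Int × Int)) : Decidable (Spec_iter_brush_positions center_x center_y size shape out) := by unfold Spec_iter_brush_positions; infer_instance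

-- ===== CLAIM (what is proved, stated in full; the proofs are below) =====
def Claim_equal_iter_brush_positions : Prop := ∀ (center_x : Int) (center_y : Int) (size : Int) (shape : String), Dom_iter_brush_positions center_x center_y size shape → Spec_iter_brush_positions center_x center_y size shape (iter_brush_positions center_x center_y size shape)

-- ===== LEMMAS AND PROOFS =====

-- the while-loop computes the floor square root: m² ≤ rem < (m+1)²
theorem halfWidthLoop_spec (rem m : Int) (hm : 0 ≤ m) (hle : m * m ≤ rem) :
    0 ≤ halfWidthLoop rem m ∧ halfWidthLoop rem m * halfWidthLoop rem m ≤ rem ∧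
      rem < (halfWidthLoop rem m + 1) * (halfWidthLoop rem m + 1) := by
  fun_induction halfWidthLoop rem m with
  | case1 m h ih => exact ih (by omega) h
  | case2 m h => omega

-- filtering an integer interval by a predicate equivalent to lo ≤ x ≤ hi yields the subinterval
theorem filter_pyRange_interval (p : Int → Bool) (lo hi : Int) :
    ∀ (n : Nat) (a b : Int), (b - a).toNat = n → hi + 1 ≤ b →
      (∀ x, p x = true ↔ lo ≤ x ∧ x ≤ hi) →
      (PySem.List.pyRange a b 1).filter p = PySem.List.pyRange (max a lo) (hi + 1) 1 := by
  intro n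
  induction n with
  | zero =>
    intro a b hn hb hp
    rw [PySem.List.pyRange_one_eq_nil (by omega), PySem.List.pyRange_one_eq_nil (by omega)]
    rfl
  | succ k ih =>
    intro a b hn hb hp
    rw [PySem.List.pyRange_one_cons (by omega)]
    by_cases hpa : p a = true
    · have hbounds := (hp a).mp hpa
      rw [List.filter_cons_of_pos hpa, ih (a + 1) b (by omega) hb hp,
          show max (a + 1) lo = a + 1 by omega, show max a lo = a by omega,
          PySem.List.pyRange_one_cons (show a < hi + 1 by omega)]
    · have hout : ¬ (lo ≤ a ∧ a ≤ hi) := fun hc => hpa ((hp a).mpr hc)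
      rw [not_and_or, not_le, not_le] at hout
      rw [List.filter_cons_of_neg (by simp [hpa]), ih (a + 1) b (by omega) hb hp]
      rcases hout with hcase | hcase
      · congr 1; omega
      · rw [PySem.List.pyRange_one_eq_nil (by omega), PySem.List.pyRange_one_eq_nil (by omega)]

-- one circle row of A (full scan with distance test) equals one scanline row of B (a map)
theorem row_eq (center_x center_y radius dy : Int) (hdy : -radius ≤ dy ∧ dy ≤ radius) (acc : List (Int × Int)) :
    (PySem.List.pyRange (-radius) (radius + 1) 1).foldl (fun acc dx =>
        if dx * dx + dy * dy ≤ radius * radius then acc ++ [(center_x + dx, center_y + dy)] else acc) acc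
      = acc ++ (PySem.List.pyRange (-(halfWidthLoop (radius * radius - dy * dy) 0))
          (halfWidthLoop (radius * radius - dy * dy) 0 + 1) 1).map (fun dx => (center_x + dx, center_y + dy)) := by
  have hr : 0 ≤ radius := by omega
  have hrem : 0 ≤ radius * radius - dy * dy := by nlinarith
  obtain ⟨hm0, hm1, hm2⟩ := halfWidthLoop_spec (radius * radius - dy * dy) 0 le_rfl (by omega)
  set m := halfWidthLoop (radius * radius - dy * dy) 0 with hmdef
  have hmr : m ≤ radius := by nlinarith
  have h1 : (fun acc dx => if dx * dx + dy * dy ≤ radius * radius then acc ++ [(center_x + dx, center_y + dy)] else acc)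
      = (fun acc dx => if (fun x => decide (-m ≤ x ∧ x ≤ m)) dx then acc ++ [((fun dx => (center_x + dx, center_y + dy)) dx)] else acc) := by
    funext acc dx
    by_cases h : dx * dx + dy * dy ≤ radius * radius
    · rw [if_pos h, if_pos]
      simp only [decide_eq_true_eq]
      constructor
      · nlinarith [abs_nonneg dx, sq_abs dx, neg_abs_le dx, le_abs_self dx]
      · nlinarith [abs_nonneg dx, sq_abs dx, neg_abs_le dx, le_abs_self dx]
    · rw [if_neg h, if_neg]
      simp only [decide_eq_true_eq]
      intro ⟨h1, h2⟩
      exact h (by nlinarith)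
  rw [h1, PySem.List.foldl_append_if]
  rw [filter_pyRange_interval _ (-m) m (radius + 1 - (-radius)).toNat _ _ rfl (by omega)
      (by intro x; simp), show max (-radius) (-m) = -m by omega]

-- ===== VERDICT (by name: the statement is the Claim_ definition above) =====
theorem iter_brush_positions_spec : Claim_equal_iter_brush_positions := by
  intro center_x center_y size shape _
  unfold Spec_iter_brush_positions iter_brush_positions iter_brush_positions_alt
  by_cases hs : (shape == "circle") = true
  · simp only [hs, if_true]
    rw [PySem.List.foldl_congr_mem _ _ (fun acc dy =>
        acc ++ (PySem.List.pyRange (-(halfWidthLoop (PySem.Int.floordiv size 2 * PySem.Int.floordiv size 2 - dy * dy) 0))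
          (halfWidthLoop (PySem.Int.floordiv size 2 * PySem.Int.floordiv size 2 - dy * dy) 0 + 1) 1).map
          (fun dx => (center_x + dx, center_y + dy))) _
      (by intro acc dy hdy
          exact row_eq center_x center_y _ dy (by
            have := (PySem.List.mem_pyRange_one).mp hdy; omega) acc)]
    rw [PySem.List.foldl_append_eq_flatMap]
    rfl
  · simp only [Bool.not_eq_true] at hs
    simp only [hs, Bool.false_eq_true, if_false]
    rw [PySem.List.foldl_congr_mem _ _ (fun acc dy =>
        acc ++ (PySem.List.pyRange (-(PySem.Int.floordiv size 2)) (PySem.Int.floordiv size 2 + 1) 1).map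
          (fun dx => (center_x + dx, center_y + dy))) _
      (by intro acc dy _; exact PySem.List.foldl_append_singleton_eq_map _ _ _)]
    rw [PySem.List.foldl_append_eq_flatMap]
    rfl
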